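-- pv_equiv track=rewrite | github.com/heitorfilho/modelo_vetorial | modelo_vetorial.py | gerar_ocorrencia_documento
-- ===== SOURCE A (Python) =====
-- def gerar_ocorrencia_documento(indice_invertido):
--
--     documentos_termos_frequencias = {}
--     # Preencha o dicionário com documentos, termos e frequências
--     for termo, lista_documentos in indice_invertido.items():
--         for doc_id, freq in lista_documentos:
--             if doc_id not in documentos_termos_frequencias:
--                 documentos_termos_frequencias[doc_id] = []
--             documentos_termos_frequencias[doc_id].append((termo, freq))
--
--     # Ordenar o dicionário com base nas chaves (números dos documentos)
--     documentos_termos_frequencias_ordenado = dict(sorted(documentos_termos_frequencias.items()))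
--
--     return documentos_termos_frequencias_ordenado
-- ===== SOURCE B (Python) =====
-- def gerar_ocorrencia_documento(indice_invertido):
--     # Flatten to (doc_id, termo, freq) triples, stable-sort by doc_id only,
--     # then collect consecutive runs of equal doc_id with a two-pointer scan.
--     triples = [(doc_id, termo, freq)
--                for termo, lista_documentos in indice_invertido.items()
--                for doc_id, freq in lista_documentos]
--     triples.sort(key=lambda t: t[0])
--     resultado = {}
--     i, n = 0, len(triples)
--     while i < n:
--         doc_id = triples[i][0]
--         j = i
--         while j < n and triples[j][0] == doc_id:
--             j += 1
--         resultado[doc_id] = [(termo, freq) for _, termo, freq in triples[i:j]]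
--         i = j
--     return resultado
-- ===== Notes on version B (the rewrite author's own statement) =====
-- stated objective: alternative
-- what changed: Instead of grouping into a dict during the nested iteration and then sorting the dict items, B flattens the inverted index into (doc_id, termo, freq) triples, stable-sorts them by doc_id only, and builds each document's list by a two-pointer scan over consecutive equal-doc_id runs.
import Mathlib
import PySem

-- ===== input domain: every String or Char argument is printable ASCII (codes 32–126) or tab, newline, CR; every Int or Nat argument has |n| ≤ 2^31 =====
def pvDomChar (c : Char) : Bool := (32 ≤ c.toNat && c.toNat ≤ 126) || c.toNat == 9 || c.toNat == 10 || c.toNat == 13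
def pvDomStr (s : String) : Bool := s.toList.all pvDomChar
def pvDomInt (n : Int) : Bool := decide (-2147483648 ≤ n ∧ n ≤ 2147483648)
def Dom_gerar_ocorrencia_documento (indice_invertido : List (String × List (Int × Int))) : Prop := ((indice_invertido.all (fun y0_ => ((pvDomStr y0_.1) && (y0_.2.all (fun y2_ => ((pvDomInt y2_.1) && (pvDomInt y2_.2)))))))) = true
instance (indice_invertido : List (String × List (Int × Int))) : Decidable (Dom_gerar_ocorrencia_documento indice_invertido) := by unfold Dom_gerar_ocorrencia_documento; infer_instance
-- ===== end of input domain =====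

-- B groups by flatten + stable sort by doc_id + consecutive-run scan instead of A's
-- dict-while-iterating + final sort; alternative decomposition, same asymptotic cost.

-- ===== PORT A =====
-- Python's final `dict(sorted(D.items()))` sorts (doc_id, list) pairs by full-tuple
-- comparison; the dict's keys are distinct, so only doc_id is ever compared — the
-- key-only sort below is exact.
def gerar_ocorrencia_documento (indice_invertido : List (String × List (Int × Int))) : List (Int × List (String × Int)) :=
  let dtf : PySem.Dict Int (List (String × Int)) :=
    indice_invertido.foldl (fun d p =>
      p.2.foldl (fun d q =>
        let d := if d.contains q.1 then d else d.insert q.1 []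
        -- D[doc_id].append((termo, freq)) on a key guaranteed present
        d.modify q.1 [] (fun l => l ++ [(p.1, q.2)])) d) PySem.Dict.empty
  PySem.List.sorted dtf.items (fun it => it.1)

-- ===== PORT B =====
-- the index-based inner `while` run scan of Source B, as structural recursion on the
-- remaining suffix: takeWhile/dropWhile is exactly `while j < n and triples[j][0] == doc_id`
def pvRuns : List (Int × String × Int) → List (Int × List (String × Int))
  | [] => []
  | x :: rest =>
      (x.1, ((x :: rest.takeWhile (fun y => y.1 == x.1)).map (fun y => y.2))) ::
        pvRuns (rest.dropWhile (fun y => y.1 == x.1))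
termination_by l => l.length
decreasing_by
  simp only [List.length_cons]
  exact Nat.lt_succ_of_le (List.length_dropWhile_le _ _)

def gerar_ocorrencia_documento_alt (indice_invertido : List (String × List (Int × Int))) : List (Int × List (String × Int)) :=
  let triples : List (Int × String × Int) :=
    indice_invertido.flatMap (fun p => p.2.map (fun q => (q.1, p.1, q.2)))
  pvRuns (PySem.List.sorted triples (fun t => t.1))

-- ===== PRECONDITION & SPEC =====
def Spec_gerar_ocorrencia_documento (indice_invertido : List (String × List (Int × Int))) (out : List (Int × List (String × Int))) : Prop := out = gerar_ocorrencia_documento_alt indice_invertido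
instance (indice_invertido : List (String × List (Int × Int))) (out : List (Int × List (String × Int))) : Decidable (Spec_gerar_ocorrencia_documento indice_invertido out) := by unfold Spec_gerar_ocorrencia_documento; infer_instance

-- ===== CLAIM (what is proved, stated in full; the proofs are below) =====
def Claim_equal_gerar_ocorrencia_documento : Prop := ∀ (indice_invertido : List (String × List (Int × Int))), Dom_gerar_ocorrencia_documento indice_invertido → Spec_gerar_ocorrencia_documento indice_invertido (gerar_ocorrencia_documento indice_invertido)

-- ===== LEMMAS AND PROOFS =====

-- A's guarded insert-then-append step is a single modify
theorem pv_step_eq (d : PySem.Dict Int (List (String × Int))) (k : Int) (f : List (String × Int) → List (String × Int)) :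
    PySem.Dict.modify (if d.contains k then d else d.insert k []) k [] f = d.modify k [] f := by
  by_cases h : d.contains k = true
  · simp [h]
  · simp only [h, Bool.false_eq_true, if_false]
    unfold PySem.Dict.modify
    rw [PySem.Dict.getD_insert_self, PySem.Dict.insert_insert_self,
        PySem.Dict.getD_of_not_contains d [] (by simpa using h)]

-- A's nested dict-building loop is the flat fold over the triples
theorem pv_dict_eq (ii : List (String × List (Int × Int))) :
    ii.foldl (fun d p =>
      p.2.foldl (fun d q =>
        PySem.Dict.modify (if d.contains q.1 then d else d.insert q.1 []) q.1 []
          (fun l => l ++ [(p.1, q.2)])) d) PySem.Dict.empty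
    = (ii.flatMap (fun p => p.2.map (fun q => (q.1, p.1, q.2)))).foldl
        (fun d x => d.modify x.1 [] (fun l => l ++ [x.2])) PySem.Dict.empty := by
  rw [List.foldl_flatMap]
  apply PySem.List.foldl_congr_mem
  intro d p _
  rw [List.foldl_map]
  apply PySem.List.foldl_congr_mem
  intro d q _
  exact pv_step_eq d q.1 _

-- stable-sort preserves the subsequence of each fixed key (filter_insertBy, filter_sorted)
theorem pv_filter_insertBy {α : Type} (key : α → Int) (x : α) (k : Int) :
    ∀ ys : List α, ys.Pairwise (fun a b => key a ≤ key b) →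
    (PySem.List.insertBy (fun a b => decide (key a < key b)) x ys).filter (fun z => key z == k)
      = ys.filter (fun z => key z == k) ++ (if key x == k then [x] else []) := by
  intro ys
  induction ys with
  | nil =>
    intro _
    by_cases hk : key x = k <;> simp [PySem.List.insertBy, hk]
  | cons y ys ih =>
    intro hp
    unfold PySem.List.insertBy
    by_cases hlt : key x < key y
    · rw [if_pos (by simpa using hlt)]
      by_cases hk : key x = k
      · have hy : ¬ key y = k := by omega
        have hys : ∀ z ∈ ys, ¬ key z = k := by
          intro z hz
          have := (List.pairwise_cons.mp hp).1 z hz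
          omega
        simp only [List.filter_cons, show (key x == k) = true by simpa using hk,
          show (key y == k) = false by simpa using hy, if_true, Bool.false_eq_true, if_false]
        rw [List.filter_eq_nil_iff.mpr (by intro z hz; simpa using hys z hz)]
        simp
      · simp only [List.filter_cons, show (key x == k) = false by simpa using hk,
          Bool.false_eq_true, if_false]
        simp
    · rw [if_neg (by simpa using hlt)]
      simp only [List.filter_cons]
      rw [ih (List.pairwise_cons.mp hp).2]
      split <;> simp

theorem pv_filter_sorted {α : Type} (key : α → Int) (k : Int) (xs : List α) :
    (PySem.List.sorted xs key).filter (fun z => key z == k) = xs.filter (fun z => key z == k) := by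
  induction xs using List.reverseRecOn with
  | nil => simp [PySem.List.sorted_eq_foldl_insertBy]
  | append_singleton xs x ih =>
    rw [PySem.List.sorted_eq_foldl_insertBy, List.foldl_append, ← PySem.List.sorted_eq_foldl_insertBy]
    simp only [List.foldl_cons, List.foldl_nil]
    rw [pv_filter_insertBy key x k _ (PySem.List.sorted_pairwise xs key), ih]
    simp [List.filter_append, List.filter_cons]

-- Set.ofList through a leading constant run
theorem pv_foldl_add_skip (l : List Int) (s : PySem.Set Int)
    (h : ∀ b ∈ l, b ∈ s) : l.foldl PySem.Set.add s = s := by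
  induction l generalizing s with
  | nil => rfl
  | cons b l ih =>
    simp only [List.foldl_cons]
    rw [show PySem.Set.add s b = s by
      unfold PySem.Set.add; rw [if_pos (by simp [h b (by simp)])]]
    exact ih s (fun c hc => h c (by simp [hc]))

theorem pv_foldl_add_cons (a : Int) (l : List Int) (s : PySem.Set Int)
    (h : a ∉ l) : l.foldl PySem.Set.add (a :: s) = a :: l.foldl PySem.Set.add s := by
  induction l generalizing s with
  | nil => rfl
  | cons b l ih =>
    simp only [List.foldl_cons]
    have hba : (b == a) = false := by
      simp only [beq_eq_false_iff_ne, ne_eq]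
      rintro rfl; exact h (by simp)
    have hcc : PySem.Set.contains (a :: s) b = PySem.Set.contains s b := by
      unfold PySem.Set.contains
      rw [List.contains_cons, hba, Bool.false_or]
    rw [show PySem.Set.add (a :: s) b = a :: PySem.Set.add s b by
      unfold PySem.Set.add; rw [hcc]; split <;> simp]
    exact ih _ (fun hmem => h (List.mem_cons_of_mem _ hmem))

theorem pv_ofList_run (a : Int) (l1 l2 : List Int)
    (h1 : ∀ b ∈ l1, b = a) (h2 : a ∉ l2) :
    PySem.Set.ofList (a :: (l1 ++ l2)) = a :: PySem.Set.ofList l2 := by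
  rw [PySem.Set.ofList_eq_foldl, PySem.Set.ofList_eq_foldl]
  simp only [List.foldl_cons, List.foldl_append]
  rw [show PySem.Set.add [] a = [a] from rfl]
  rw [pv_foldl_add_skip l1 [a] (by intro b hb; simp [h1 b hb])]
  exact pv_foldl_add_cons a l2 [] h2

-- facts about the dropWhile suffix under sortedness
theorem pv_dropWhile_gt (x : Int × String × Int) (rest : List (Int × String × Int))
    (hp : (x :: rest).Pairwise (fun a b => a.1 ≤ b.1)) :
    ∀ y ∈ rest.dropWhile (fun y => y.1 == x.1), x.1 < y.1 := by
  intro y hy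
  have hle : x.1 ≤ y.1 :=
    (List.pairwise_cons.mp hp).1 y ((List.dropWhile_sublist _).subset hy)
  rcases hd : rest.dropWhile (fun y => y.1 == x.1) with _ | ⟨z, dr⟩
  · rw [hd] at hy; simp at hy
  · have hz : ¬ (z.1 == x.1) = true := by
      have := List.head?_dropWhile_not (fun y => y.1 == x.1) rest
      rw [hd] at this; simpa using this
    rw [hd] at hy
    have hzle : x.1 < z.1 := by
      have : x.1 ≤ z.1 := (List.pairwise_cons.mp hp).1 z
        ((List.dropWhile_sublist _).subset (by rw [hd]; simp))
      simp at hz; omega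
    rcases List.mem_cons.mp hy with rfl | hy'
    · exact hzle
    · have hsub : (z :: dr).Sublist rest := by
        rw [← hd]; exact List.dropWhile_sublist _
      have hpz : (z :: dr).Pairwise (fun a b => a.1 ≤ b.1) :=
        ((List.pairwise_cons.mp hp).2).sublist hsub
      have := (List.pairwise_cons.mp hpz).1 y hy'
      omega

-- the run scan over a key-sorted list is the canonical per-key grouping
theorem pv_runs_spec : ∀ us : List (Int × String × Int),
    us.Pairwise (fun a b => a.1 ≤ b.1) →
    pvRuns us = (PySem.Set.ofList (us.map (fun p => p.1))).map
      (fun k => (k, (us.filter (fun p => p.1 == k)).map (fun p => p.2))) := by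
  intro us
  induction us using pvRuns.induct with
  | case1 => intro _; simp [pvRuns]
  | case2 x rest ih =>
    intro hp
    have htd := List.takeWhile_append_dropWhile (l := rest) (p := fun y => y.1 == x.1)
    have htk : ∀ y ∈ rest.takeWhile (fun y => y.1 == x.1), y.1 = x.1 := by
      intro y hy; simpa using List.mem_takeWhile_imp hy
    have hdr := pv_dropWhile_gt x rest hp
    have hpd : (rest.dropWhile (fun y => y.1 == x.1)).Pairwise (fun a b => a.1 ≤ b.1) :=
      ((List.pairwise_cons.mp hp).2).sublist (List.dropWhile_sublist _)
    rw [pvRuns, ih hpd]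
    -- key list
    have hkeys : PySem.Set.ofList ((x :: rest).map (fun p => p.1))
        = x.1 :: PySem.Set.ofList ((rest.dropWhile (fun y => y.1 == x.1)).map (fun p => p.1)) := by
      have : (x :: rest).map (fun p => p.1)
          = x.1 :: ((rest.takeWhile (fun y => y.1 == x.1)).map (fun p => p.1)
              ++ (rest.dropWhile (fun y => y.1 == x.1)).map (fun p => p.1)) := by
        simp [← List.map_append, htd]
      rw [this]
      apply pv_ofList_run
      · intro b hb
        rcases List.mem_map.mp hb with ⟨y, hy, rfl⟩
        exact htk y hy
      · intro hb
        rcases List.mem_map.mp hb with ⟨y, hy, hxy⟩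
        exact absurd hxy.symm (by have := hdr y hy; omega)
    rw [hkeys, List.map_cons]
    congr 1
    · -- head group
      have : (x :: rest).filter (fun p => p.1 == x.1)
          = x :: rest.takeWhile (fun y => y.1 == x.1) := by
        conv_lhs => rw [show (x : Int × String × Int) :: rest
          = x :: (rest.takeWhile (fun y => y.1 == x.1) ++ rest.dropWhile (fun y => y.1 == x.1)) by rw [htd]]
        simp only [List.filter_cons, List.filter_append]
        rw [List.filter_eq_self.mpr (by intro y hy; simp [htk y hy]),
            List.filter_eq_nil_iff.mpr (by intro y hy; have := hdr y hy; simp; omega)]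
        simp
      simp only [this]
      simp
    · -- tail groups
      apply List.map_congr_left
      intro k hk
      have hkmem : k ∈ (rest.dropWhile (fun y => y.1 == x.1)).map (fun p => p.1) :=
        (PySem.Set.mem_ofList _ _).mp hk
      have hkgt : x.1 < k := by
        rcases List.mem_map.mp hkmem with ⟨y, hy, rfl⟩; exact hdr y hy
      have : (x :: rest).filter (fun p => p.1 == k)
          = (rest.dropWhile (fun y => y.1 == x.1)).filter (fun p => p.1 == k) := by
        conv_lhs => rw [show (x : Int × String × Int) :: rest
          = x :: (rest.takeWhile (fun y => y.1 == x.1) ++ rest.dropWhile (fun y => y.1 == x.1)) by rw [htd]]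
        simp only [List.filter_cons, List.filter_append]
        rw [List.filter_eq_nil_iff.mpr (by intro y hy; have := htk y hy; simp; omega)]
        simp
        omega
      simp only [this]

-- keys of runs are strictly increasing
theorem pv_runs_pairwise : ∀ us : List (Int × String × Int),
    us.Pairwise (fun a b => a.1 ≤ b.1) →
    (pvRuns us).Pairwise (fun a b => a.1 < b.1) := by
  intro us
  induction us using pvRuns.induct with
  | case1 => intro _; simp [pvRuns]
  | case2 x rest ih =>
    intro hp
    have hpd : (rest.dropWhile (fun y => y.1 == x.1)).Pairwise (fun a b => a.1 ≤ b.1) :=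
      ((List.pairwise_cons.mp hp).2).sublist (List.dropWhile_sublist _)
    rw [pvRuns]
    refine List.pairwise_cons.mpr ⟨?_, ih hpd⟩
    intro z hz
    rw [pv_runs_spec _ hpd] at hz
    rcases List.mem_map.mp hz with ⟨k, hk, rfl⟩
    rcases List.mem_map.mp ((PySem.Set.mem_ofList _ _).mp hk) with ⟨y, hy, rfl⟩
    exact pv_dropWhile_gt x rest hp y hy

-- A's dict items in insertion order, characterised
theorem pv_items_eq (ts : List (Int × String × Int)) :
    (ts.foldl (fun d x => d.modify x.1 [] (fun l => l ++ [x.2])) PySem.Dict.empty).items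
    = (PySem.Set.ofList (ts.map (fun p => p.1))).map
        (fun k => (k, (ts.filter (fun p => p.1 == k)).map (fun p => p.2))) := by
  set d := ts.foldl (fun d x => d.modify x.1 [] (fun l => l ++ [x.2])) PySem.Dict.empty with hd
  have hkeys : d.keys = PySem.Set.ofList (ts.map (fun p => p.1)) := by
    rw [hd, PySem.Dict.keys_foldl_modify_key ts (fun x => x.1) [] (fun _ x l => l ++ [x.2])]
    simp [PySem.Dict.keys_empty, PySem.Set.update, PySem.Set.ofList_eq_foldl]
  have hnd : d.keys.Nodup := by
    rw [hkeys]; exact PySem.Set.nodup_ofList _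
  rw [PySem.Dict.items_eq_map_keys d hnd [], hkeys]
  apply List.map_congr_left
  intro k _
  have := PySem.Dict.getD_foldl_modify_append ts PySem.Dict.empty k
  rw [hd, this, PySem.Dict.getD_empty]
  simp

-- ===== VERDICT (by name: the statement is the Claim_ definition above) =====
theorem gerar_ocorrencia_documento_spec : Claim_equal_gerar_ocorrencia_documento := by
  intro ii _
  unfold Spec_gerar_ocorrencia_documento gerar_ocorrencia_documento gerar_ocorrencia_documento_alt
  dsimp only
  set ts := ii.flatMap (fun p => p.2.map (fun q => (q.1, p.1, q.2))) with hts
  rw [pv_dict_eq ii, pv_items_eq ts]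
  set sts := PySem.List.sorted ts (fun t => t.1) with hsts
  have hsp : sts.Pairwise (fun a b => a.1 ≤ b.1) := PySem.List.sorted_pairwise ts _
  apply PySem.List.sorted_eq_of_perm_of_pairwise_lt
  · -- pvRuns sts is a permutation of the canonical map over first-appearance keys
    rw [pv_runs_spec sts hsp]
    have hfilters : ∀ k, sts.filter (fun p => p.1 == k) = ts.filter (fun p => p.1 == k) := by
      intro k; exact pv_filter_sorted (fun p => p.1) k ts
    have hmapf : (PySem.Set.ofList (sts.map (fun p => p.1))).map
          (fun k => (k, (sts.filter (fun p => p.1 == k)).map (fun p => p.2)))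
        = (PySem.Set.ofList (sts.map (fun p => p.1))).map
          (fun k => (k, (ts.filter (fun p => p.1 == k)).map (fun p => p.2))) := by
      apply List.map_congr_left; intro k _; rw [hfilters k]
    rw [hmapf]
    apply List.Perm.map
    -- the two key sets are perms of each other
    have h1 : (PySem.Set.ofList (sts.map (fun p => p.1))).Nodup := PySem.Set.nodup_ofList _
    have h2 : (PySem.Set.ofList (ts.map (fun p => p.1))).Nodup := PySem.Set.nodup_ofList _
    rw [List.perm_ext_iff_of_nodup h1 h2]
    intro k
    rw [PySem.Set.mem_ofList, PySem.Set.mem_ofList]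
    constructor
    · rintro hk
      rcases List.mem_map.mp hk with ⟨y, hy, rfl⟩
      exact List.mem_map.mpr ⟨y, (PySem.List.mem_sorted _ _ _ _).mp hy, rfl⟩
    · rintro hk
      rcases List.mem_map.mp hk with ⟨y, hy, rfl⟩
      exact List.mem_map.mpr ⟨y, (PySem.List.mem_sorted _ _ _ _).mpr hy, rfl⟩
  · exact pv_runs_pairwise sts hsp
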